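-- pv_equiv track=rewrite | github.com/Tawe/tyrantofthedarkskies | scripts/sync_contributions_to_firebase.py | get_contribution_type
-- ===== SOURCE A (Python) =====
-- CONTRIBUTION_MAPPING = {
--     'contributions/maneuvers': {
--         'type': 'game_data',
--         'data_type': 'maneuvers',
--         'id_field': 'maneuver_id',
--         'save_method': 'save_game_data'
--     },
--     'contributions/planets': {
--         'type': 'game_data',
--         'data_type': 'planets',
--         'id_field': 'planet_id',
--         'save_method': 'save_game_data'
--     },
--     'contributions/races': {
--         'type': 'game_data',
--         'data_type': 'races',
--         'id_field': 'race_id',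
--         'save_method': 'save_game_data'
--     },
--     'contributions/starsigns': {
--         'type': 'game_data',
--         'data_type': 'starsigns',
--         'id_field': 'starsign_id',
--         'save_method': 'save_game_data'
--     },
--     'contributions/weapons': {
--         'type': 'game_data',
--         'data_type': 'weapons',
--         'id_field': 'id',
--         'save_method': 'save_game_data'
--     },
--     'contributions/weapon_modifiers': {
--         'type': 'game_data',
--         'data_type': 'weapon_modifiers',
--         'id_field': 'id',
--         'save_method': 'save_game_data'
--     },
--     'contributions/rooms': {
--         'type': 'world',
--         'data_type': 'rooms',
--         'id_field': 'room_id',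
--         'save_method': 'save_room'
--     },
--     'contributions/npcs': {
--         'type': 'world',
--         'data_type': 'npcs',
--         'id_field': 'npc_id',
--         'save_method': 'save_npc'
--     },
--     'contributions/creatures': {
--         'type': 'world',
--         'data_type': 'npcs',
--         'id_field': 'template_id',
--         'save_method': 'save_npc'
--     },
--     'contributions/items/armor': {
--         'type': 'world',
--         'data_type': 'items',
--         'id_field': 'item_id',
--         'save_method': 'save_item'
--     },
--     'contributions/items/objects': {
--         'type': 'world',
--         'data_type': 'items',
--         'id_field': 'item_id',
--         'save_method': 'save_item'
--     },
--     'contributions/items/weapons': {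
--         'type': 'world',
--         'data_type': 'items',
--         'id_field': 'item_id',
--         'save_method': 'save_item'
--     },
--     'contributions/shop_items': {
--         'type': 'world',
--         'data_type': 'shop_items',
--         'id_field': 'item_id',
--         'save_method': 'save_shop_item'
--     }
-- }
--
-- def get_contribution_type(filepath):
--     """Determine the contribution type based on file path."""
--     # Normalize path
--     filepath = filepath.replace('\\', '/')
--
--     # Find matching directory
--     for contrib_dir, mapping in CONTRIBUTION_MAPPING.items():
--         if filepath.startswith(contrib_dir + '/'):
--             return mapping
--
--     # Try to match parent directory for nested structures
--     parts = filepath.split('/')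
--     if len(parts) >= 3:
--         parent_dir = '/'.join(parts[:3])  # e.g., 'contributions/items/armor'
--         if parent_dir in CONTRIBUTION_MAPPING:
--             return CONTRIBUTION_MAPPING[parent_dir]
--
--     return None
-- ===== SOURCE B (Python) =====
-- # Different decomposition: instead of scanning 13 full-path keys with startswith
-- # plus a join fallback, split once into segments, gate on 'contributions', and
-- # CONSTRUCT the result dict from compact per-segment data (id fields / world
-- # triples), handling the 'items' subtree by its third segment.
--
-- _GAME_DATA_ID = {
--     'maneuvers': 'maneuver_id',
--     'planets': 'planet_id',
--     'races': 'race_id',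
--     'starsigns': 'starsign_id',
--     'weapons': 'id',
--     'weapon_modifiers': 'id',
-- }
--
-- _WORLD = {
--     'rooms': ('rooms', 'room_id', 'save_room'),
--     'npcs': ('npcs', 'npc_id', 'save_npc'),
--     'creatures': ('npcs', 'template_id', 'save_npc'),
--     'shop_items': ('shop_items', 'item_id', 'save_shop_item'),
-- }
--
--
-- def get_contribution_type(filepath):
--     """Determine the contribution type based on file path."""
--     parts = filepath.replace('\\', '/').split('/')
--     if len(parts) < 3 or parts[0] != 'contributions':
--         return None
--     sub = parts[1]
--     if sub == 'items':
--         if parts[2] in ('armor', 'objects', 'weapons'):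
--             return {'type': 'world', 'data_type': 'items',
--                     'id_field': 'item_id', 'save_method': 'save_item'}
--         return None
--     if sub in _GAME_DATA_ID:
--         return {'type': 'game_data', 'data_type': sub,
--                 'id_field': _GAME_DATA_ID[sub], 'save_method': 'save_game_data'}
--     if sub in _WORLD:
--         dt, idf, sm = _WORLD[sub]
--         return {'type': 'world', 'data_type': dt, 'id_field': idf,
--                 'save_method': sm}
--     return None
-- ===== Notes on version B (the rewrite author's own statement) =====
-- stated objective: alternative
-- what changed: Replaces the linear startswith scan over 13 full-path keys plus a join-based fallback lookup by a single split into segments, a gate on the leading segment, and construction of the result dict from compact per-segment data (an id-field table for game_data, a triple table for world types, and a membership test on the third segment for the items subtree).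
import Mathlib
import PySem

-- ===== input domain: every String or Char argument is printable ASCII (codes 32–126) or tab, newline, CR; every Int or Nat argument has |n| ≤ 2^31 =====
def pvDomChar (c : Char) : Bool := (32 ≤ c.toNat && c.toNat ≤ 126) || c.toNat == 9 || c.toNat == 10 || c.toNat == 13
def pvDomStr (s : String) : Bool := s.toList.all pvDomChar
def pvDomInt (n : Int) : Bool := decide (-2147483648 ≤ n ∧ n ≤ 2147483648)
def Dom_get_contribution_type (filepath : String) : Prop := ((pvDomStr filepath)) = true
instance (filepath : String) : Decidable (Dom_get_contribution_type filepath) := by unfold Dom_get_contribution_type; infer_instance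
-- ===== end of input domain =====

-- B keeps A's result but replaces the 13-key startswith scan + join fallback by one split,
-- a gate on the leading 'contributions' segment, and construction of the result dict from
-- compact per-segment data (objective: alternative).

-- ===== PORT A =====
def pvContributionMapping : List (List Char × List (String × String)) := [
  ("contributions/maneuvers".toList, [("type", "game_data"), ("data_type", "maneuvers"), ("id_field", "maneuver_id"), ("save_method", "save_game_data")]),
  ("contributions/planets".toList, [("type", "game_data"), ("data_type", "planets"), ("id_field", "planet_id"), ("save_method", "save_game_data")]),
  ("contributions/races".toList, [("type", "game_data"), ("data_type", "races"), ("id_field", "race_id"), ("save_method", "save_game_data")]),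
  ("contributions/starsigns".toList, [("type", "game_data"), ("data_type", "starsigns"), ("id_field", "starsign_id"), ("save_method", "save_game_data")]),
  ("contributions/weapons".toList, [("type", "game_data"), ("data_type", "weapons"), ("id_field", "id"), ("save_method", "save_game_data")]),
  ("contributions/weapon_modifiers".toList, [("type", "game_data"), ("data_type", "weapon_modifiers"), ("id_field", "id"), ("save_method", "save_game_data")]),
  ("contributions/rooms".toList, [("type", "world"), ("data_type", "rooms"), ("id_field", "room_id"), ("save_method", "save_room")]),
  ("contributions/npcs".toList, [("type", "world"), ("data_type", "npcs"), ("id_field", "npc_id"), ("save_method", "save_npc")]),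
  ("contributions/creatures".toList, [("type", "world"), ("data_type", "npcs"), ("id_field", "template_id"), ("save_method", "save_npc")]),
  ("contributions/items/armor".toList, [("type", "world"), ("data_type", "items"), ("id_field", "item_id"), ("save_method", "save_item")]),
  ("contributions/items/objects".toList, [("type", "world"), ("data_type", "items"), ("id_field", "item_id"), ("save_method", "save_item")]),
  ("contributions/items/weapons".toList, [("type", "world"), ("data_type", "items"), ("id_field", "item_id"), ("save_method", "save_item")]),
  ("contributions/shop_items".toList, [("type", "world"), ("data_type", "shop_items"), ("id_field", "item_id"), ("save_method", "save_shop_item")])]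

-- the for-loop over CONTRIBUTION_MAPPING.items() with early return
def pvScan : List (List Char × List (String × String)) → List Char → Option (List (String × String))
  | [], _ => none
  | (k, m) :: rest, fp => if PySem.Chars.startswith fp (k ++ ['/']) then some m else pvScan rest fp

def get_contribution_type (filepath : String) : Option (List (String × String)) :=
  let fp := PySem.Chars.replace filepath.toList ['\\'] ['/']
  match pvScan pvContributionMapping fp with
  | some m => some m
  | none =>
    let parts := PySem.Chars.splitOn fp ['/']
    if 3 ≤ parts.length then
      let parent := PySem.Chars.join ['/'] (PySem.List.slice parts none (some 3))
      match PySem.Dict.get? ⟨pvContributionMapping⟩ parent with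
      | some m => some m
      | none => none
    else none

-- ===== PORT B =====
-- compact id-field table for game_data types
def pvGameDataId : List (List Char × String) := [
  ("maneuvers".toList, "maneuver_id"),
  ("planets".toList, "planet_id"),
  ("races".toList, "race_id"),
  ("starsigns".toList, "starsign_id"),
  ("weapons".toList, "id"),
  ("weapon_modifiers".toList, "id")]

-- (data_type, id_field, save_method) triples for world types
def pvWorld : List (List Char × (String × String × String)) := [
  ("rooms".toList, ("rooms", "room_id", "save_room")),
  ("npcs".toList, ("npcs", "npc_id", "save_npc")),
  ("creatures".toList, ("npcs", "template_id", "save_npc")),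
  ("shop_items".toList, ("shop_items", "item_id", "save_shop_item"))]

def get_contribution_type_alt (filepath : String) : Option (List (String × String)) :=
  let parts := PySem.Chars.splitOn (PySem.Chars.replace filepath.toList ['\\'] ['/']) ['/']
  -- the 'len(parts) < 3' half of B's gate is realised by the match arms below
  match parts with
  | p0 :: sub :: p2 :: _ =>
    if "contributions".toList ≠ p0 then none
    else if "items".toList = sub then
      if "armor".toList = p2 ∨ "objects".toList = p2 ∨ "weapons".toList = p2 then
        some [("type", "world"), ("data_type", "items"), ("id_field", "item_id"), ("save_method", "save_item")]
      else none
    else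
      match PySem.Dict.get? ⟨pvGameDataId⟩ sub with
      | some idf => some [("type", "game_data"), ("data_type", String.ofList sub), ("id_field", idf), ("save_method", "save_game_data")]
      | none =>
        match PySem.Dict.get? ⟨pvWorld⟩ sub with
        | some (dt, idf, sm) => some [("type", "world"), ("data_type", dt), ("id_field", idf), ("save_method", sm)]
        | none => none
  | _ => none

-- ===== PRECONDITION & SPEC =====
def Spec_get_contribution_type (filepath : String) (out : Option (List (String × String))) : Prop := out = get_contribution_type_alt filepath
instance (filepath : String) (out : Option (List (String × String))) : Decidable (Spec_get_contribution_type filepath out) := by unfold Spec_get_contribution_type; infer_instance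

-- ===== CLAIM (what is proved, stated in full; the proofs are below) =====
def Claim_equal_get_contribution_type : Prop := ∀ (filepath : String), Dom_get_contribution_type filepath → Spec_get_contribution_type filepath (get_contribution_type filepath)

-- ===== LEMMAS AND PROOFS =====

-- clean structural model of Python's str.split('/')
def pvSplit : List Char → List (List Char)
  | [] => [[]]
  | c :: t => if c = '/' then [] :: pvSplit t else (pvSplit t).modifyHead (c :: ·)

lemma pvGo (fuel : Nat) : ∀ (l cur : List Char) (acc' : List (List Char)) (_ : l.length ≤ fuel),
    PySem.Chars.splitOn.go ['/'] fuel l cur acc' = acc'.reverse ++ (pvSplit l).modifyHead (cur.reverse ++ ·) := by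
  induction fuel with
  | zero =>
    intro l cur acc' h
    have : l = [] := by cases l <;> simp_all
    subst this
    simp [PySem.Chars.splitOn.go, pvSplit]
  | succ n ih =>
    intro l cur acc' h
    cases l with
    | nil => simp [PySem.Chars.splitOn.go, pvSplit]
    | cons c t =>
      rw [PySem.Chars.splitOn.go]
      by_cases hc : c = '/'
      · subst hc
        simp only [List.isPrefixOf, beq_self_eq_true, Bool.true_and, if_true, List.length_cons,
          List.length_nil, List.drop_succ_cons, List.drop_zero]
        rw [ih t [] (cur.reverse :: acc') (by simpa using Nat.le_of_succ_le_succ h)]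
        cases hsp2 : pvSplit t <;> simp [pvSplit, hsp2]
      · have hpre : (['/'].isPrefixOf (c :: t)) = false := by simp [List.isPrefixOf]; exact fun h => absurd h.symm hc
        rw [hpre]
        simp only [Bool.false_eq_true, if_false]
        rw [ih t (c :: cur) acc' (by simpa using Nat.le_of_succ_le_succ h)]
        simp only [pvSplit, if_neg hc, List.reverse_cons]
        cases hsp : pvSplit t with
        | nil => simp
        | cons p ps => simp

lemma pvSplitOn (l : List Char) : PySem.Chars.splitOn l ['/'] = pvSplit l := by
  rw [PySem.Chars.splitOn, pvGo (l.length + 1) l [] [] (by omega)]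
  cases hsp : pvSplit l <;> simp

lemma pvSplit_ne_nil (l : List Char) : pvSplit l ≠ [] := by
  induction l with
  | nil => simp [pvSplit]
  | cons c t ih =>
    simp only [pvSplit]
    split
    · simp
    · cases hsp : pvSplit t <;> simp_all

lemma pvSplit_noslash (l : List Char) : ∀ p ∈ pvSplit l, '/' ∉ p := by
  induction l with
  | nil => simp [pvSplit]
  | cons c t ih =>
    simp only [pvSplit]
    split
    · simpa using ih
    · rename_i hc
      cases hsp : pvSplit t with
      | nil => simp
      | cons p ps =>
        simp only [List.modifyHead, List.mem_cons]
        rintro q (rfl | hq)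
        · intro hm
          rcases List.mem_cons.mp hm with h | h
          · exact hc h.symm
          · exact ih p (by simp [hsp]) h
        · exact ih q (by simp [hsp, hq])

lemma pvSplit_cons2 (l x y : List Char) (rest : List (List Char)) (h : pvSplit l = x :: y :: rest) :
    ∃ t, l = x ++ '/' :: t ∧ pvSplit t = y :: rest := by
  induction l generalizing x with
  | nil => simp [pvSplit] at h
  | cons c t ih =>
    simp only [pvSplit] at h
    split at h
    · rename_i hc
      subst hc
      obtain ⟨rfl, hr⟩ : x = [] ∧ pvSplit t = y :: rest := by
        constructor <;> simp_all
      exact ⟨t, by simp, hr⟩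
    · rename_i hc
      cases hsp : pvSplit t with
      | nil => exact absurd hsp (pvSplit_ne_nil t)
      | cons p ps =>
        rw [hsp] at h
        simp only [List.modifyHead] at h
        obtain ⟨rfl, hps⟩ : x = c :: p ∧ ps = y :: rest := by
          constructor <;> simp_all
        subst hps
        obtain ⟨t', ht', hsp'⟩ := ih p (by simp_all)
        exact ⟨t', by simp [ht'], hsp'⟩

lemma pvSplit_single (l x : List Char) (h : pvSplit l = [x]) : l = x := by
  induction l generalizing x with
  | nil => simp [pvSplit] at h; simp [h]
  | cons c t ih =>
    simp only [pvSplit] at h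
    split at h
    · exact absurd (by simp_all : pvSplit t = []) (pvSplit_ne_nil t)
    · cases hsp : pvSplit t with
      | nil => exact absurd hsp (pvSplit_ne_nil t)
      | cons p ps =>
        rw [hsp] at h
        simp only [List.modifyHead] at h
        obtain ⟨rfl, rfl⟩ : x = c :: p ∧ ps = [] := by constructor <;> simp_all
        simp [ih p (by simp_all)]

lemma pvCount (l : List Char) : (pvSplit l).length = l.count '/' + 1 := by
  induction l with
  | nil => simp [pvSplit]
  | cons c t ih =>
    simp only [pvSplit]
    split
    · rename_i hc; subst hc; simp [ih]
    · rename_i hc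
      cases hsp : pvSplit t with
      | nil => exact absurd hsp (pvSplit_ne_nil t)
      | cons p ps => simp_all

lemma pvK5 (a : List Char) : ∀ (x s t : List Char), '/' ∉ a → '/' ∉ x →
    ((a ++ '/' :: s) <+: (x ++ '/' :: t) ↔ (a = x ∧ s <+: t)) := by
  induction a with
  | nil =>
    intro x s t _ hx
    cases x with
    | nil => simp
    | cons c x' =>
      simp only [List.nil_append, List.cons_append, List.cons_prefix_cons]
      constructor
      · rintro ⟨rfl, -⟩; exact absurd (by simp) hx
      · rintro ⟨h, -⟩; simp at h
  | cons b a' ih =>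
    intro x s t ha hx
    cases x with
    | nil =>
      simp only [List.cons_append, List.nil_append, List.cons_prefix_cons]
      constructor
      · rintro ⟨rfl, -⟩; exact absurd (by simp) ha
      · rintro ⟨h, -⟩; simp at h
    | cons c x' =>
      simp only [List.cons_append, List.cons_prefix_cons]
      rw [ih x' s t (fun h => ha (by simp [h])) (fun h => hx (by simp [h]))]
      constructor
      · rintro ⟨rfl, rfl, h⟩; simp [h]
      · rintro ⟨h, hst⟩
        obtain ⟨rfl, rfl⟩ : b = c ∧ a' = x' := by simp_all
        exact ⟨rfl, rfl, hst⟩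

lemma pvK6 (a : List Char) : ∀ (x s t : List Char), '/' ∉ a → '/' ∉ x →
    ((a ++ '/' :: s) = (x ++ '/' :: t) ↔ (a = x ∧ s = t)) := by
  intro x s t ha hx
  constructor
  · intro h
    obtain ⟨rfl, hst⟩ := (pvK5 a x s t ha hx).mp (h ▸ List.prefix_refl _)
    refine ⟨rfl, ?_⟩
    simpa using h
  · rintro ⟨rfl, rfl⟩; rfl

lemma pvStart2 (a b x y t : List Char) (ha : '/' ∉ a) (hb : '/' ∉ b) (hx : '/' ∉ x) (hy : '/' ∉ y) :
    ((a ++ '/' :: (b ++ ['/'])) <+: (x ++ '/' :: (y ++ '/' :: t)) ↔ (a = x ∧ b = y)) := by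
  rw [pvK5 a x _ _ ha hx]
  constructor
  · rintro ⟨rfl, h⟩
    have : b ++ '/' :: [] <+: y ++ '/' :: t := by simpa using h
    obtain ⟨rfl, -⟩ := (pvK5 b y [] t hb hy).mp this
    exact ⟨rfl, rfl⟩
  · rintro ⟨rfl, rfl⟩
    exact ⟨rfl, by simp⟩

lemma pvStart3 (a b c x y z t : List Char) (rest : List (List Char))
    (ha : '/' ∉ a) (hb : '/' ∉ b) (hc : '/' ∉ c) (hx : '/' ∉ x) (hy : '/' ∉ y)
    (ht : pvSplit t = z :: rest) :
    ((a ++ '/' :: (b ++ '/' :: (c ++ ['/']))) <+: (x ++ '/' :: (y ++ '/' :: t)) ↔ (a = x ∧ b = y ∧ c = z ∧ rest ≠ [])) := by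
  have hz : '/' ∉ z := pvSplit_noslash t z (by simp [ht])
  rw [pvK5 a x _ _ ha hx, pvK5 b y _ _ hb hy]
  have htail : (c ++ '/' :: [] <+: t) ↔ (c = z ∧ rest ≠ []) := by
    cases rest with
    | nil =>
      have := pvSplit_single t z ht
      subst this
      simp only [ne_eq, not_true_eq_false, and_false, iff_false]
      intro hp
      exact hz (hp.subset (by simp))
    | cons w ws =>
      obtain ⟨t', rfl, -⟩ := pvSplit_cons2 t z w ws ht
      rw [pvK5 c z [] t' hc hz]
      simp
  constructor
  · rintro ⟨rfl, rfl, h⟩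
    have := htail.mp (by simpa using h)
    exact ⟨rfl, rfl, this.1, this.2⟩
  · rintro ⟨rfl, rfl, rfl, hr⟩
    exact ⟨rfl, rfl, by simpa using htail.mpr ⟨rfl, hr⟩⟩

lemma pvEq2w (a b x y z : List Char) (ha : '/' ∉ a) (hb : '/' ∉ b) (hx : '/' ∉ x) :
    ¬ ((a ++ '/' :: b) = (x ++ '/' :: (y ++ '/' :: z))) := by
  intro h
  obtain ⟨rfl, hrest⟩ := (pvK6 a x b _ ha hx).mp h
  exact hb (by simp [hrest])

lemma pvEq3 (a b c x y z : List Char) (ha : '/' ∉ a) (hb : '/' ∉ b) (hx : '/' ∉ x) (hy : '/' ∉ y) :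
    ((a ++ '/' :: (b ++ '/' :: c)) = (x ++ '/' :: (y ++ '/' :: z)) ↔ (a = x ∧ b = y ∧ c = z)) := by
  rw [pvK6 a x _ _ ha hx, pvK6 b y _ _ hb hy]

lemma pvScan_none (l : List Char) (keys : List (List Char × List (String × String)))
    (h : ∀ km ∈ keys, ¬ ((km.1 ++ ['/']) <+: l)) : pvScan keys l = none := by
  induction keys with
  | nil => rfl
  | cons km rest ih =>
    obtain ⟨k, m⟩ := km
    simp only [pvScan]
    rw [if_neg, ih (fun km hm => h km (by simp [hm]))]
    simpa [PySem.Chars.startswith, List.isPrefixOf_iff_prefix] using h (k, m) (by simp)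

-- with at most two segments, no key of the mapping (each carrying ≥ 2 slashes) can be a prefix
lemma pvScan_none_short (l : List Char) (h2 : (pvSplit l).length ≤ 2) :
    pvScan pvContributionMapping l = none := by
  apply pvScan_none
  intro km hm hp
  have hcl : l.count '/' ≤ 1 := by have := pvCount l; omega
  have hle := List.IsPrefix.count_le '/' hp
  have h2' : 2 ≤ (km.1 ++ ['/']).count '/' := by
    fin_cases hm <;> decide
  simp only [List.count_append] at hle h2'
  omega

set_option maxHeartbeats 2000000 in
theorem get_contribution_type_spec : Claim_equal_get_contribution_type := by
  intro filepath _
  unfold Spec_get_contribution_type get_contribution_type get_contribution_type_alt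
  generalize PySem.Chars.replace filepath.toList ['\\'] ['/'] = l
  rcases hsp : pvSplit l with - | ⟨x, - | ⟨y, - | ⟨z, rest⟩⟩⟩
  · exact absurd hsp (pvSplit_ne_nil l)
  · simp [pvScan_none_short l (by rw [hsp]; simp), pvSplitOn, hsp]
  · simp [pvScan_none_short l (by rw [hsp]; simp), pvSplitOn, hsp]
  · have hx : '/' ∉ x := pvSplit_noslash l x (by simp [hsp])
    obtain ⟨t1, hl1, hs1⟩ := pvSplit_cons2 l x y (z :: rest) hsp
    have hy : '/' ∉ y := pvSplit_noslash t1 y (by simp [hs1])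
    obtain ⟨t, hl2, hs2⟩ := pvSplit_cons2 t1 y z rest hs1
    subst hl2
    subst hl1
    simp only [pvSplitOn, hsp]
    have h1 : (PySem.Chars.startswith (x ++ '/' :: (y ++ '/' :: t)) ("contributions/maneuvers".toList ++ ['/']) = true) ↔ ("contributions".toList = x ∧ "maneuvers".toList = y) := by
      rw [PySem.Chars.startswith_iff,
        show ("contributions/maneuvers".toList ++ ['/'] : List Char) = "contributions".toList ++ '/' :: ("maneuvers".toList ++ ['/']) by decide]
      exact pvStart2 _ _ _ _ _ (by decide) (by decide) hx hy
    have g1 : (("contributions/maneuvers".toList : List Char) = x ++ '/' :: (y ++ '/' :: z)) ↔ False := by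
      rw [show ("contributions/maneuvers".toList : List Char) = "contributions".toList ++ '/' :: "maneuvers".toList by decide]
      exact iff_false_intro (pvEq2w _ _ _ _ _ (by decide) (by decide) hx)
    have h2 : (PySem.Chars.startswith (x ++ '/' :: (y ++ '/' :: t)) ("contributions/planets".toList ++ ['/']) = true) ↔ ("contributions".toList = x ∧ "planets".toList = y) := by
      rw [PySem.Chars.startswith_iff,
        show ("contributions/planets".toList ++ ['/'] : List Char) = "contributions".toList ++ '/' :: ("planets".toList ++ ['/']) by decide]
      exact pvStart2 _ _ _ _ _ (by decide) (by decide) hx hy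
    have g2 : (("contributions/planets".toList : List Char) = x ++ '/' :: (y ++ '/' :: z)) ↔ False := by
      rw [show ("contributions/planets".toList : List Char) = "contributions".toList ++ '/' :: "planets".toList by decide]
      exact iff_false_intro (pvEq2w _ _ _ _ _ (by decide) (by decide) hx)
    have h3 : (PySem.Chars.startswith (x ++ '/' :: (y ++ '/' :: t)) ("contributions/races".toList ++ ['/']) = true) ↔ ("contributions".toList = x ∧ "races".toList = y) := by
      rw [PySem.Chars.startswith_iff,
        show ("contributions/races".toList ++ ['/'] : List Char) = "contributions".toList ++ '/' :: ("races".toList ++ ['/']) by decide]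
      exact pvStart2 _ _ _ _ _ (by decide) (by decide) hx hy
    have g3 : (("contributions/races".toList : List Char) = x ++ '/' :: (y ++ '/' :: z)) ↔ False := by
      rw [show ("contributions/races".toList : List Char) = "contributions".toList ++ '/' :: "races".toList by decide]
      exact iff_false_intro (pvEq2w _ _ _ _ _ (by decide) (by decide) hx)
    have h4 : (PySem.Chars.startswith (x ++ '/' :: (y ++ '/' :: t)) ("contributions/starsigns".toList ++ ['/']) = true) ↔ ("contributions".toList = x ∧ "starsigns".toList = y) := by
      rw [PySem.Chars.startswith_iff,
        show ("contributions/starsigns".toList ++ ['/'] : List Char) = "contributions".toList ++ '/' :: ("starsigns".toList ++ ['/']) by decide]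
      exact pvStart2 _ _ _ _ _ (by decide) (by decide) hx hy
    have g4 : (("contributions/starsigns".toList : List Char) = x ++ '/' :: (y ++ '/' :: z)) ↔ False := by
      rw [show ("contributions/starsigns".toList : List Char) = "contributions".toList ++ '/' :: "starsigns".toList by decide]
      exact iff_false_intro (pvEq2w _ _ _ _ _ (by decide) (by decide) hx)
    have h5 : (PySem.Chars.startswith (x ++ '/' :: (y ++ '/' :: t)) ("contributions/weapons".toList ++ ['/']) = true) ↔ ("contributions".toList = x ∧ "weapons".toList = y) := by
      rw [PySem.Chars.startswith_iff,
        show ("contributions/weapons".toList ++ ['/'] : List Char) = "contributions".toList ++ '/' :: ("weapons".toList ++ ['/']) by decide]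
      exact pvStart2 _ _ _ _ _ (by decide) (by decide) hx hy
    have g5 : (("contributions/weapons".toList : List Char) = x ++ '/' :: (y ++ '/' :: z)) ↔ False := by
      rw [show ("contributions/weapons".toList : List Char) = "contributions".toList ++ '/' :: "weapons".toList by decide]
      exact iff_false_intro (pvEq2w _ _ _ _ _ (by decide) (by decide) hx)
    have h6 : (PySem.Chars.startswith (x ++ '/' :: (y ++ '/' :: t)) ("contributions/weapon_modifiers".toList ++ ['/']) = true) ↔ ("contributions".toList = x ∧ "weapon_modifiers".toList = y) := by
      rw [PySem.Chars.startswith_iff,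
        show ("contributions/weapon_modifiers".toList ++ ['/'] : List Char) = "contributions".toList ++ '/' :: ("weapon_modifiers".toList ++ ['/']) by decide]
      exact pvStart2 _ _ _ _ _ (by decide) (by decide) hx hy
    have g6 : (("contributions/weapon_modifiers".toList : List Char) = x ++ '/' :: (y ++ '/' :: z)) ↔ False := by
      rw [show ("contributions/weapon_modifiers".toList : List Char) = "contributions".toList ++ '/' :: "weapon_modifiers".toList by decide]
      exact iff_false_intro (pvEq2w _ _ _ _ _ (by decide) (by decide) hx)
    have h7 : (PySem.Chars.startswith (x ++ '/' :: (y ++ '/' :: t)) ("contributions/rooms".toList ++ ['/']) = true) ↔ ("contributions".toList = x ∧ "rooms".toList = y) := by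
      rw [PySem.Chars.startswith_iff,
        show ("contributions/rooms".toList ++ ['/'] : List Char) = "contributions".toList ++ '/' :: ("rooms".toList ++ ['/']) by decide]
      exact pvStart2 _ _ _ _ _ (by decide) (by decide) hx hy
    have g7 : (("contributions/rooms".toList : List Char) = x ++ '/' :: (y ++ '/' :: z)) ↔ False := by
      rw [show ("contributions/rooms".toList : List Char) = "contributions".toList ++ '/' :: "rooms".toList by decide]
      exact iff_false_intro (pvEq2w _ _ _ _ _ (by decide) (by decide) hx)
    have h8 : (PySem.Chars.startswith (x ++ '/' :: (y ++ '/' :: t)) ("contributions/npcs".toList ++ ['/']) = true) ↔ ("contributions".toList = x ∧ "npcs".toList = y) := by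
      rw [PySem.Chars.startswith_iff,
        show ("contributions/npcs".toList ++ ['/'] : List Char) = "contributions".toList ++ '/' :: ("npcs".toList ++ ['/']) by decide]
      exact pvStart2 _ _ _ _ _ (by decide) (by decide) hx hy
    have g8 : (("contributions/npcs".toList : List Char) = x ++ '/' :: (y ++ '/' :: z)) ↔ False := by
      rw [show ("contributions/npcs".toList : List Char) = "contributions".toList ++ '/' :: "npcs".toList by decide]
      exact iff_false_intro (pvEq2w _ _ _ _ _ (by decide) (by decide) hx)
    have h9 : (PySem.Chars.startswith (x ++ '/' :: (y ++ '/' :: t)) ("contributions/creatures".toList ++ ['/']) = true) ↔ ("contributions".toList = x ∧ "creatures".toList = y) := by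
      rw [PySem.Chars.startswith_iff,
        show ("contributions/creatures".toList ++ ['/'] : List Char) = "contributions".toList ++ '/' :: ("creatures".toList ++ ['/']) by decide]
      exact pvStart2 _ _ _ _ _ (by decide) (by decide) hx hy
    have g9 : (("contributions/creatures".toList : List Char) = x ++ '/' :: (y ++ '/' :: z)) ↔ False := by
      rw [show ("contributions/creatures".toList : List Char) = "contributions".toList ++ '/' :: "creatures".toList by decide]
      exact iff_false_intro (pvEq2w _ _ _ _ _ (by decide) (by decide) hx)
    have h10 : (PySem.Chars.startswith (x ++ '/' :: (y ++ '/' :: t)) ("contributions/items/armor".toList ++ ['/']) = true) ↔ ("contributions".toList = x ∧ "items".toList = y ∧ "armor".toList = z ∧ rest ≠ []) := by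
      rw [PySem.Chars.startswith_iff,
        show ("contributions/items/armor".toList ++ ['/'] : List Char) = "contributions".toList ++ '/' :: ("items".toList ++ '/' :: ("armor".toList ++ ['/'])) by decide]
      exact pvStart3 _ _ _ _ _ _ _ _ (by decide) (by decide) (by decide) hx hy hs2
    have g10 : (("contributions/items/armor".toList : List Char) = x ++ '/' :: (y ++ '/' :: z)) ↔ ("contributions".toList = x ∧ "items".toList = y ∧ "armor".toList = z) := by
      rw [show ("contributions/items/armor".toList : List Char) = "contributions".toList ++ '/' :: ("items".toList ++ '/' :: "armor".toList) by decide]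
      exact pvEq3 _ _ _ _ _ _ (by decide) (by decide) hx hy
    have h11 : (PySem.Chars.startswith (x ++ '/' :: (y ++ '/' :: t)) ("contributions/items/objects".toList ++ ['/']) = true) ↔ ("contributions".toList = x ∧ "items".toList = y ∧ "objects".toList = z ∧ rest ≠ []) := by
      rw [PySem.Chars.startswith_iff,
        show ("contributions/items/objects".toList ++ ['/'] : List Char) = "contributions".toList ++ '/' :: ("items".toList ++ '/' :: ("objects".toList ++ ['/'])) by decide]
      exact pvStart3 _ _ _ _ _ _ _ _ (by decide) (by decide) (by decide) hx hy hs2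
    have g11 : (("contributions/items/objects".toList : List Char) = x ++ '/' :: (y ++ '/' :: z)) ↔ ("contributions".toList = x ∧ "items".toList = y ∧ "objects".toList = z) := by
      rw [show ("contributions/items/objects".toList : List Char) = "contributions".toList ++ '/' :: ("items".toList ++ '/' :: "objects".toList) by decide]
      exact pvEq3 _ _ _ _ _ _ (by decide) (by decide) hx hy
    have h12 : (PySem.Chars.startswith (x ++ '/' :: (y ++ '/' :: t)) ("contributions/items/weapons".toList ++ ['/']) = true) ↔ ("contributions".toList = x ∧ "items".toList = y ∧ "weapons".toList = z ∧ rest ≠ []) := by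
      rw [PySem.Chars.startswith_iff,
        show ("contributions/items/weapons".toList ++ ['/'] : List Char) = "contributions".toList ++ '/' :: ("items".toList ++ '/' :: ("weapons".toList ++ ['/'])) by decide]
      exact pvStart3 _ _ _ _ _ _ _ _ (by decide) (by decide) (by decide) hx hy hs2
    have g12 : (("contributions/items/weapons".toList : List Char) = x ++ '/' :: (y ++ '/' :: z)) ↔ ("contributions".toList = x ∧ "items".toList = y ∧ "weapons".toList = z) := by
      rw [show ("contributions/items/weapons".toList : List Char) = "contributions".toList ++ '/' :: ("items".toList ++ '/' :: "weapons".toList) by decide]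
      exact pvEq3 _ _ _ _ _ _ (by decide) (by decide) hx hy
    have h13 : (PySem.Chars.startswith (x ++ '/' :: (y ++ '/' :: t)) ("contributions/shop_items".toList ++ ['/']) = true) ↔ ("contributions".toList = x ∧ "shop_items".toList = y) := by
      rw [PySem.Chars.startswith_iff,
        show ("contributions/shop_items".toList ++ ['/'] : List Char) = "contributions".toList ++ '/' :: ("shop_items".toList ++ ['/']) by decide]
      exact pvStart2 _ _ _ _ _ (by decide) (by decide) hx hy
    have g13 : (("contributions/shop_items".toList : List Char) = x ++ '/' :: (y ++ '/' :: z)) ↔ False := by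
      rw [show ("contributions/shop_items".toList : List Char) = "contributions".toList ++ '/' :: "shop_items".toList by decide]
      exact iff_false_intro (pvEq2w _ _ _ _ _ (by decide) (by decide) hx)
    have hsl3 : PySem.List.slice (x :: y :: z :: rest) none (some 3) = [x, y, z] := by
      simp [PySem.List.slice_to]
    have hjoin : PySem.Chars.join ['/'] [x, y, z] = x ++ '/' :: (y ++ '/' :: z) := by
      simp [PySem.Chars.join, List.intercalate]
    have hlen2 : 3 ≤ (x :: y :: z :: rest : List (List Char)).length := by simp
    simp only [pvScan, pvContributionMapping, pvGameDataId, pvWorld, PySem.Dict.get?, List.find?,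
      Bool.beq_eq_decide_eq, h1, h2, h3, h4, h5, h6, h7, h8, h9, h10, h11, h12, h13,
      g1, g2, g3, g4, g5, g6, g7, g8, g9, g10, g11, g12, g13, hsl3, hjoin, hlen2, ne_eq]
    by_cases hcx : "contributions".toList = x
    case neg => simp_all
    case pos =>
    subst hcx
    by_cases hy1 : "maneuvers".toList = y
    case pos => subst hy1; simp_all
    case neg =>
    by_cases hy2 : "planets".toList = y
    case pos => subst hy2; simp_all
    case neg =>
    by_cases hy3 : "races".toList = y
    case pos => subst hy3; simp_all
    case neg =>
    by_cases hy4 : "starsigns".toList = y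
    case pos => subst hy4; simp_all
    case neg =>
    by_cases hy5 : "weapons".toList = y
    case pos => subst hy5; simp_all
    case neg =>
    by_cases hy6 : "weapon_modifiers".toList = y
    case pos => subst hy6; simp_all
    case neg =>
    by_cases hy7 : "rooms".toList = y
    case pos => subst hy7; simp_all
    case neg =>
    by_cases hy8 : "npcs".toList = y
    case pos => subst hy8; simp_all
    case neg =>
    by_cases hy9 : "creatures".toList = y
    case pos => subst hy9; simp_all
    case neg =>
    by_cases hy10 : "shop_items".toList = y
    case pos => subst hy10; simp_all
    case neg =>
    by_cases hy11 : "items".toList = y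
    case neg => simp_all
    case pos =>
    subst hy11
    by_cases hz1 : "armor".toList = z
    case pos => subst hz1; simp_all; cases rest <;> simp_all
    case neg =>
    by_cases hz2 : "objects".toList = z
    case pos => subst hz2; simp_all; cases rest <;> simp_all
    case neg =>
    by_cases hz3 : "weapons".toList = z
    case pos => subst hz3; simp_all; cases rest <;> simp_all
    case neg =>
    simp_all
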